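-- pv_equiv track=rewrite | github.com/msat-cont/citizendesk-core | src/citizendesk/ingest/url/eff_tlds.py | take_specific_domain
-- ===== SOURCE A (Python) =====
-- ASCII_INT_TAG = 'xn--'
--
-- DOMAIN_CON = '.'
--
-- def take_specific_domain(tlds, domain):
--     if ASCII_INT_TAG in domain:
--         try:
--             domain = domain.decode('idna')
--         except:
--             pass
--
--     domain_parts = domain.strip().split(DOMAIN_CON)
--     if not domain_parts:
--         return ''
--
--     # is it of an excluded domain (from the starred domains)
--     for ind in range(len(domain_parts)):
--         domain_suffix = DOMAIN_CON.join(domain_parts[ind:])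
--         if not domain_suffix:
--             continue
--         if domain_suffix in tlds['excluded']:
--             # the excluded domains are already the specific ones
--             return domain_suffix
--
--     # is it of an starred domain
--     for ind in range(len(domain_parts)):
--         domain_suffix = DOMAIN_CON.join(domain_parts[ind:])
--         if not domain_suffix:
--             continue
--         if domain_suffix in tlds['starred']:
--             # even the one-longer suffix is still common for a starred domain
--             ind_spec = ind - 2
--             if ind_spec < 0:
--                 ind_spec = 0
--             return DOMAIN_CON.join(domain_parts[ind_spec:])
--
--     # is it of a common domain
--     for ind in range(len(domain_parts)):
--         domain_suffix = DOMAIN_CON.join(domain_parts[ind:])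
--         if not domain_suffix:
--             continue
--         if domain_suffix in tlds['common']:
--             # the one-longer suffix is the specific one for a common domain
--             ind_spec = ind - 1
--             if ind_spec < 0:
--                 ind_spec = 0
--             return DOMAIN_CON.join(domain_parts[ind_spec:])
--
--     # when the common domain not found
--     ind_spec = len(domain_parts) - 2
--     if ind_spec < 0:
--         ind_spec = 0
--     return DOMAIN_CON.join(domain_parts[ind_spec:])
-- ===== SOURCE B (Python) =====
-- DOMAIN_CON = '.'
--
--
-- def take_specific_domain(tlds, domain):
--     # Different strategy: instead of scanning all suffix positions per category,
--     # build ONE hash index mapping each dot-suffix (built incrementally from the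
--     # right) to its position, then iterate over each category's member list with
--     # O(1) lookups and take the smallest matching position (the earliest suffix).
--     # Category priority (excluded > starred > common) and the per-category
--     # back-offsets are applied to that position.
--     domain = domain.strip()
--     if not domain:
--         # an empty domain has no registrable suffix
--         return ''
--     parts = domain.split(DOMAIN_CON)
--     idx = {}
--     suffix = None
--     for i in range(len(parts) - 1, -1, -1):
--         suffix = parts[i] if suffix is None else parts[i] + DOMAIN_CON + suffix
--         if suffix:
--             idx[suffix] = i
--     i = min((idx[s] for s in tlds['excluded'] if s in idx), default=None)
--     if i is not None:
--         return DOMAIN_CON.join(parts[i:])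
--     i = min((idx[s] for s in tlds['starred'] if s in idx), default=None)
--     if i is not None:
--         return DOMAIN_CON.join(parts[max(i - 2, 0):])
--     i = min((idx[s] for s in tlds['common'] if s in idx), default=None)
--     if i is not None:
--         return DOMAIN_CON.join(parts[max(i - 1, 0):])
--     return DOMAIN_CON.join(parts[max(len(parts) - 2, 0):])
-- ===== Notes on version B (the rewrite author's own statement) =====
-- stated objective: alternative
-- what changed: B replaces A's three staged scans over suffix positions (each re-joining every suffix and scanning the category list per position) by one reverse pass that builds every dot-suffix incrementally into a hash index suffix->position, then iterates over each category's member list with O(1) lookups taking the smallest matching position, applying the excluded>starred>common priority and back-offsets after lookup.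
import Mathlib
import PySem

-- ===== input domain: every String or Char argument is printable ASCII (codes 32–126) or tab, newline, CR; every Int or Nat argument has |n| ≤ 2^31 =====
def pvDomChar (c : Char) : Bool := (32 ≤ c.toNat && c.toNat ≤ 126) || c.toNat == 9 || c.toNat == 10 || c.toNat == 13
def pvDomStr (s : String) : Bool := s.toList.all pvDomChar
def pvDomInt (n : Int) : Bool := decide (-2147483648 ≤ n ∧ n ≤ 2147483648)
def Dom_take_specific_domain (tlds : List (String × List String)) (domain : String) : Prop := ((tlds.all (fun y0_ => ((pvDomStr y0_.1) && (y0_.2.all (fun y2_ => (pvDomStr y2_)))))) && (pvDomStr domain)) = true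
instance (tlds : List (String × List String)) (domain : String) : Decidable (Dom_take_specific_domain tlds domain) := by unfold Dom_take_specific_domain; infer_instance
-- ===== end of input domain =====

-- B replaces A's three staged scans over suffix positions by one hash index
-- (each dot-suffix, built incrementally from the right, mapped to its position)
-- queried once per category member, taking the smallest matching position
-- (alternative decomposition: iterate over the TLD lists, not the suffixes).

-- ===== PORT A =====
-- one 'for ind in range(len(parts))' loop with early return: first index whose
-- (non-empty) suffix '.'.join(parts[ind:]) is in tset
def pvScanA (parts tset : List String) : List Nat → Option Nat
  | [] => none
  | ind :: rest =>
    -- 'if not domain_suffix: continue; if domain_suffix in tset: return ind'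
    if PySem.Str.join "." (parts.drop ind) ≠ "" ∧ PySem.Str.join "." (parts.drop ind) ∈ tset
    then some ind
    else pvScanA parts tset rest

def take_specific_domain (tlds : List (String × List String)) (domain : String) : String :=
  -- 'if ASCII_INT_TAG in domain: try: domain = domain.decode('idna') except: pass' —
  -- str has no .decode in Python 3, the AttributeError is caught by the bare except,
  -- so the branch never changes domain: ported as a no-op.
  let d := PySem.Dict.ofList tlds
  -- domain_parts = domain.strip().split('.');  parts[ind:] for ind ≥ 0 is List.drop
  let parts := (PySem.Str.split? (PySem.Str.strip domain) ".").getD []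
  if parts = [] then ""
  else
    -- tlds['excluded'] etc.: Pre_ guarantees the key is present where it is looked up
    match pvScanA parts ((d.get? "excluded").getD []) (List.range parts.length) with
    | some ind => PySem.Str.join "." (parts.drop ind)
    | none =>
      match pvScanA parts ((d.get? "starred").getD []) (List.range parts.length) with
      | some ind => PySem.Str.join "." (parts.drop (ind - 2))  -- Nat sub = max(ind-2,0)
      | none =>
        match pvScanA parts ((d.get? "common").getD []) (List.range parts.length) with
        | some ind => PySem.Str.join "." (parts.drop (ind - 1))
        | none => PySem.Str.join "." (parts.drop (parts.length - 2))

-- ===== PORT B =====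
-- the 'for i in range(len(parts)-1, -1, -1)' loop of Source B as structural recursion on
-- the parts list (processing the tail = the larger indices first, exactly the reversed
-- loop order): returns (suffix so far, idx); 'i' is the absolute index of the head.
-- 'suffix is None' holds exactly on the first iteration (rest = []).
def pvBuildIdx : Nat → List String → (String × PySem.Dict String Nat)
  | _, [] => ("", PySem.Dict.empty)
  | i, p :: rest =>
    match pvBuildIdx (i+1) rest with
    | (t, m) =>
      -- suffix = parts[i] if suffix is None else parts[i] + '.' + suffix
      let suffix := if rest = [] then p else p ++ "." ++ t
      if suffix = "" then (suffix, m)          -- 'if suffix:' guard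
      else (suffix, m.insert suffix i)         -- idx[suffix] = i

-- min((idx[s] for s in t if s in idx), default=None)
def pvCatMin (idx : PySem.Dict String Nat) (t : List String) : Option Nat :=
  PySem.List.min? (t.filterMap (fun s => idx.get? s)) (fun j => j)

def take_specific_domain_alt (tlds : List (String × List String)) (domain : String) : String :=
  -- domain = domain.strip(); if not domain: return ''
  let dom := PySem.Str.strip domain
  if dom = "" then ""
  else
    let parts := (PySem.Str.split? dom ".").getD []
    let idx := (pvBuildIdx 0 parts).2
    let d := PySem.Dict.ofList tlds
    -- tlds['excluded'] etc.: Pre_ guarantees the key is present where it is looked up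
    match pvCatMin idx ((d.get? "excluded").getD []) with
    | some i => PySem.Str.join "." (parts.drop i)
    | none =>
      match pvCatMin idx ((d.get? "starred").getD []) with
      | some i => PySem.Str.join "." (parts.drop (i - 2))   -- Nat sub = max(i-2,0)
      | none =>
        match pvCatMin idx ((d.get? "common").getD []) with
        | some i => PySem.Str.join "." (parts.drop (i - 1))
        | none => PySem.Str.join "." (parts.drop (parts.length - 2))

-- ===== PRECONDITION & SPEC =====
-- some index has a non-empty suffix '.'.join(parts[i:]) listed in t
def pvSuffixHit (parts t : List String) : Bool :=
  (List.range parts.length).any (fun i =>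
    decide (PySem.Str.join "." (parts.drop i) ≠ "" ∧ PySem.Str.join "." (parts.drop i) ∈ t))

-- Pre_ excludes exactly the inputs on which A raises KeyError: a key among 'excluded',
-- 'starred', 'common' is looked up but missing — 'excluded' whenever the stripped domain
-- is non-empty, 'starred' only if no excluded suffix matches, 'common' only if no starred
-- suffix matches either.  (B raises KeyError on exactly the same inputs.)
def Pre_take_specific_domain (tlds : List (String × List String)) (domain : String) : Prop :=
  PySem.Str.strip domain = "" ∨
  (((PySem.Dict.ofList tlds).get? "excluded").isSome = true ∧
   (pvSuffixHit ((PySem.Str.split? (PySem.Str.strip domain) ".").getD [])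
        (((PySem.Dict.ofList tlds).get? "excluded").getD []) = true ∨
    (((PySem.Dict.ofList tlds).get? "starred").isSome = true ∧
     (pvSuffixHit ((PySem.Str.split? (PySem.Str.strip domain) ".").getD [])
          (((PySem.Dict.ofList tlds).get? "starred").getD []) = true ∨
      ((PySem.Dict.ofList tlds).get? "common").isSome = true))))
instance (tlds : List (String × List String)) (domain : String) : Decidable (Pre_take_specific_domain tlds domain) := by unfold Pre_take_specific_domain; infer_instance

def pvWitness_take_specific_domain : (List (String × List String)) × String :=
  ([("excluded", []), ("starred", []), ("common", ["com"])], "a.b.com")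

def Spec_take_specific_domain (tlds : List (String × List String)) (domain : String) (out : String) : Prop := out = take_specific_domain_alt tlds domain
instance (tlds : List (String × List String)) (domain : String) (out : String) : Decidable (Spec_take_specific_domain tlds domain out) := by unfold Spec_take_specific_domain; infer_instance

-- ===== CLAIM =====
def Claim_equal_take_specific_domain : Prop := ∀ (tlds : List (String × List String)) (domain : String), Dom_take_specific_domain tlds domain → Pre_take_specific_domain tlds domain → Spec_take_specific_domain tlds domain (take_specific_domain tlds domain)

-- ===== LEMMAS AND PROOFS =====

-- forward first-hit scan over the suffixes of ps starting at absolute index k: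
-- the common characterisation both programs are reduced to
def pvFwd (t : List String) : Nat → List String → Option Nat
  | _, [] => none
  | k, p :: rest =>
    if PySem.Str.join "." (p :: rest) ≠ "" ∧ PySem.Str.join "." (p :: rest) ∈ t
    then some k
    else pvFwd t (k+1) rest

-- lookup specification of the built index: first position (from k) whose non-empty
-- suffix equals s
def pvLook : Nat → List String → String → Option Nat
  | _, [], _ => none
  | k, p :: rest, s =>
    if PySem.Str.join "." (p :: rest) ≠ "" ∧ s = PySem.Str.join "." (p :: rest)
    then some k
    else pvLook (k+1) rest s

lemma pvJoin_singleton (p : String) : PySem.Str.join "." [p] = p := by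
  rw [← String.toList_inj, PySem.Str.toList_join]
  simp [PySem.Chars.join, List.intercalate]

lemma pvJoin_cons_cons (p q : String) (rest : List String) :
    PySem.Str.join "." (p :: q :: rest) = p ++ "." ++ PySem.Str.join "." (q :: rest) := by
  rw [← String.toList_inj, PySem.Str.toList_join]
  simp only [List.map_cons, PySem.Chars.join_cons_cons, String.toList_append,
    PySem.Str.toList_join, List.map_cons]

lemma pvJoin_nil : PySem.Str.join "." ([] : List String) = "" := by
  rw [← String.toList_inj, PySem.Str.toList_join]
  simp [PySem.Chars.join, List.intercalate]

-- the built suffix is '.'.join of the remaining parts …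
lemma pvBuildIdx_fst : ∀ (ps : List String), ps ≠ [] → ∀ (i : Nat),
    (pvBuildIdx i ps).1 = PySem.Str.join "." ps := by
  intro ps
  induction ps with
  | nil => intro h; exact absurd rfl h
  | cons p rest ih =>
    intro _ i
    rcases hpb : pvBuildIdx (i+1) rest with ⟨t, m⟩
    rw [pvBuildIdx, hpb]
    have hsuf : (if rest = [] then p else p ++ "." ++ t) = PySem.Str.join "." (p :: rest) := by
      cases rest with
      | nil => simp [pvJoin_singleton]
      | cons q rs =>
        rw [if_neg (by simp), show t = PySem.Str.join "." (q :: rs) from by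
              rw [← ih (by simp) (i+1), hpb], ← pvJoin_cons_cons]
    dsimp only
    rw [hsuf]
    by_cases hz : PySem.Str.join "." (p :: rest) = ""
    · rw [if_pos hz]
    · rw [if_neg hz]

-- … and looking a string up in the built index is the first-position search pvLook
lemma pvBuildIdx_get? : ∀ (ps : List String) (i : Nat) (s : String),
    ((pvBuildIdx i ps).2).get? s = pvLook i ps s := by
  intro ps
  induction ps with
  | nil => intro i s; simp [pvBuildIdx, pvLook, PySem.Dict.empty, PySem.Dict.get?]
  | cons p rest ih =>
    intro i s
    rcases hpb : pvBuildIdx (i+1) rest with ⟨t, m⟩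
    have hm : m.get? s = pvLook (i+1) rest s := by rw [← ih (i+1) s, hpb]
    have hsuf : (if rest = [] then p else p ++ "." ++ t) = PySem.Str.join "." (p :: rest) := by
      cases rest with
      | nil => simp [pvJoin_singleton]
      | cons q rs =>
        rw [if_neg (by simp), show t = PySem.Str.join "." (q :: rs) from by
              rw [← pvBuildIdx_fst (q :: rs) (by simp) (i+1), hpb], ← pvJoin_cons_cons]
    rw [pvBuildIdx, hpb, pvLook]
    dsimp only
    rw [hsuf]
    by_cases hz : PySem.Str.join "." (p :: rest) = ""
    · rw [if_pos hz]
      dsimp only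
      rw [hm]
      simp [hz]
    · rw [if_neg hz]
      dsimp only
      by_cases hs : s = PySem.Str.join "." (p :: rest)
      · rw [hs, PySem.Dict.get?_insert_self]
        rw [if_pos ⟨hz, rfl⟩]
      · rw [PySem.Dict.get?_insert_of_ne m i hs, hm]
        rw [if_neg (by tauto)]

lemma pvLook_ge : ∀ (ps : List String) (k j : Nat) (s : String),
    pvLook k ps s = some j → k ≤ j := by
  intro ps
  induction ps with
  | nil => intro k j s h; simp [pvLook] at h
  | cons p rest ih =>
    intro k j s h
    rw [pvLook] at h
    by_cases hc : PySem.Str.join "." (p :: rest) ≠ "" ∧ s = PySem.Str.join "." (p :: rest)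
    · rw [if_pos hc] at h
      injection h with h'
      omega
    · rw [if_neg hc] at h; exact Nat.le_of_succ_le (ih (k+1) j s h)

-- B's per-category minimum over index lookups is A's forward first-hit scan
lemma pvCatMin_eq_pvFwd : ∀ (ps : List String) (k : Nat) (t : List String),
    PySem.List.min? (t.filterMap (pvLook k ps)) (fun j => j) = pvFwd t k ps := by
  intro ps
  induction ps with
  | nil =>
    intro k t
    rw [pvFwd, show t.filterMap (pvLook k []) = [] by simp [pvLook]]
    exact PySem.List.min?_eq_none_iff [] _ |>.mpr rfl
  | cons p rest ih =>
    intro k t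
    by_cases hc : PySem.Str.join "." (p :: rest) ≠ "" ∧ PySem.Str.join "." (p :: rest) ∈ t
    · -- the head suffix is in t: k is in the candidate list and is its minimum
      rw [pvFwd, if_pos hc]
      have hk : k ∈ t.filterMap (pvLook k (p :: rest)) := by
        refine List.mem_filterMap.mpr ⟨PySem.Str.join "." (p :: rest), hc.2, ?_⟩
        rw [pvLook, if_pos ⟨hc.1, rfl⟩]
      have hge : ∀ j ∈ t.filterMap (pvLook k (p :: rest)), k ≤ j := by
        intro j hj
        obtain ⟨s, _, hs⟩ := List.mem_filterMap.mp hj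
        exact pvLook_ge (p :: rest) k j s hs
      cases hmin : PySem.List.min? (t.filterMap (pvLook k (p :: rest))) (fun j => j) with
      | none =>
        exact absurd (List.ne_nil_of_mem hk)
          (not_not.mpr ((PySem.List.min?_eq_none_iff _ _).mp hmin))
      | some m =>
        have h1 : m ∈ t.filterMap (pvLook k (p :: rest)) := PySem.List.min?_mem hmin
        have h2 : m ≤ k := PySem.List.min?_isMin hmin k hk
        have h3 : k ≤ m := hge m h1
        exact congrArg some (Nat.le_antisymm h2 h3)
    · -- head suffix not usable: every lookup skips position k
      have hcong : t.filterMap (pvLook k (p :: rest)) = t.filterMap (pvLook (k+1) rest) := by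
        refine List.filterMap_congr ?_
        intro s hs
        rw [pvLook]
        by_cases h1 : PySem.Str.join "." (p :: rest) ≠ "" ∧ s = PySem.Str.join "." (p :: rest)
        · exact absurd ⟨h1.1, h1.2 ▸ hs⟩ hc
        · rw [if_neg h1]
      rw [pvFwd, if_neg hc, hcong, ih (k+1) t]

-- A's scan over the index range [k, parts.length) is the forward first-hit scan
-- over the dropped suffix
lemma pvScanA_eq_pvFwd (parts t : List String) :
    ∀ (n k : Nat), k + n = parts.length →
      pvScanA parts t (List.range' k n) = pvFwd t k (parts.drop k) := by
  intro n
  induction n with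
  | zero =>
    intro k hk
    rw [List.drop_of_length_le (by omega)]
    simp [List.range', pvScanA, pvFwd]
  | succ m ih =>
    intro k hk
    have hklt : k < parts.length := by omega
    have hdrop : parts.drop k = parts[k] :: parts.drop (k+1) :=
      List.drop_eq_getElem_cons hklt
    rw [show List.range' k (m+1) = k :: List.range' (k+1) m from rfl]
    rw [pvScanA, hdrop]
    rw [pvFwd, ← hdrop]
    by_cases hcnd : PySem.Str.join "." (parts.drop k) ≠ "" ∧ PySem.Str.join "." (parts.drop k) ∈ t
    · rw [if_pos hcnd, if_pos hcnd]
    · rw [if_neg hcnd, if_neg hcnd, ih (k+1) (by omega)]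

-- ===== VERDICT =====
theorem take_specific_domain_spec : Claim_equal_take_specific_domain := by
  intro tlds domain _ _
  unfold Spec_take_specific_domain
  show take_specific_domain tlds domain = take_specific_domain_alt tlds domain
  simp only [take_specific_domain, take_specific_domain_alt]
  by_cases hdom : PySem.Str.strip domain = ""
  · -- stripped domain empty: A works on parts = [''] and every scan skips; B returns ''
    rw [hdom, if_pos rfl]
    have hp : (PySem.Str.split? ("" : String) ".").getD [] = [""] := by decide
    rw [hp]
    have hjoin : PySem.Str.join "." ([""] : List String) = "" := by decide
    have hscan : ∀ t : List String, pvScanA [""] t (List.range 1) = none := by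
      intro t
      have h1 : List.range 1 = [0] := by decide
      rw [h1, pvScanA]
      simp [hjoin, pvScanA]
    simp only [List.length_cons, List.length_nil, hscan]
    simp [hjoin]
  rw [if_neg hdom]
  set parts := (PySem.Str.split? (PySem.Str.strip domain) ".").getD [] with hparts
  have hA : ∀ t : List String,
      pvScanA parts t (List.range parts.length) = pvFwd t 0 parts := by
    intro t
    rw [List.range_eq_range', pvScanA_eq_pvFwd parts t parts.length 0 (by omega)]
    simp
  have hB : ∀ t : List String, pvCatMin (pvBuildIdx 0 parts).2 t = pvFwd t 0 parts := by
    intro t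
    unfold pvCatMin
    rw [show (fun s => ((pvBuildIdx 0 parts).2).get? s) = pvLook 0 parts from
          funext (fun s => pvBuildIdx_get? parts 0 s),
        pvCatMin_eq_pvFwd parts 0 t]
  by_cases hnil : parts = []
  · rw [if_pos hnil, hnil]
    simp [pvCatMin, pvBuildIdx, PySem.Dict.empty, PySem.Dict.get?,
      PySem.List.min?, pvJoin_nil]
  · rw [if_neg hnil, hA, hA, hA, hB, hB, hB]
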